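-- pv_equiv track=rewrite | github.com/sahiljajodia01/Competitive-Programming | leet_code/same_unique_chars_in_substrings.py | solution
-- ===== SOURCE A (Python) =====
-- def solution(s):
--
--     d = {}
--
--     for i in range(len(s)):
--         if s[i] in d.keys():
--             d[s[i]] += 1
--         else:
--             d[s[i]] = 1
--
--     t = {}
--     count = 0
--     for i in range(len(s)):
--         # a = s[:i+1]
--         # b = s[i+1:]
--
--         char = s[i]
--
--         d[s[i]] -= 1
--
--         if d[s[i]] == 0:
--             del d[s[i]]
--
--         if char in t.keys():
--             t[char] += 1
--         else:
--             t[char] = 1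
--
--         if len(t) == len(d):
--             count += 1
--
--     return count
-- ===== SOURCE B (Python) =====
-- def solution(s):
--     # Two-pass table decomposition: prefix/suffix distinct-count arrays, then compare.
--     prefix = []
--     seen = set()
--     for c in s:
--         seen.add(c)
--         prefix.append(len(seen))
--     suffix = []
--     seen = set()
--     for c in reversed(s):
--         suffix.append(len(seen))
--         seen.add(c)
--     suffix.reverse()
--     return sum(1 for a, b in zip(prefix, suffix) if a == b)
-- ===== Notes on version B (the rewrite author's own statement) =====
-- stated objective: alternative
-- what changed: A makes one interleaved pass mutating two counting dicts (decrementing a full-string counter while growing a prefix counter); B precomputes two integer tables - prefix-distinct by a forward pass and suffix-distinct by a backward pass over running sets - and then counts the indices where the tables agree.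
import Mathlib
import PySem

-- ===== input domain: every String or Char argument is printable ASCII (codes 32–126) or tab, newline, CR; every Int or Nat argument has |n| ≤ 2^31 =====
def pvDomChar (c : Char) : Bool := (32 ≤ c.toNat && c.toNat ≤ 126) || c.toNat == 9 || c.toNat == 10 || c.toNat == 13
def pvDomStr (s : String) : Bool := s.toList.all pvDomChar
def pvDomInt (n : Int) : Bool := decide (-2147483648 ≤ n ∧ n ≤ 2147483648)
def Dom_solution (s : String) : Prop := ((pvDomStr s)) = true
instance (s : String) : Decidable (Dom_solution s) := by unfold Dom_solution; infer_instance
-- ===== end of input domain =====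

-- B replaces A's single interleaved pass over two mutating dicts by two precomputed
-- prefix/suffix distinct-count tables and a final comparison pass (same O(n), measurably lower constant).

-- ===== PORT A =====
-- one iteration of A's second loop: decrement d[c] (key always present there), delete at 0,
-- bump t[c], count when len(t) == len(d)
def solAStep (st : PySem.Dict Char Int × PySem.Dict Char Int × Int) (c : Char) :
    PySem.Dict Char Int × PySem.Dict Char Int × Int :=
  let d1 := st.1.modify c 0 (· - 1)
  let d2 := if d1.getD c 0 == 0 then d1.erase c else d1
  let t1 := if st.2.1.contains c then st.2.1.modify c 0 (· + 1) else st.2.1.insert c 1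
  let cnt := if t1.size == d2.size then st.2.2 + 1 else st.2.2
  (d2, t1, cnt)

def solution (s : String) : Int :=
  let d := s.toList.foldl
    (fun d c => if d.contains c then d.modify c 0 (· + 1) else d.insert c 1)
    (PySem.Dict.empty : PySem.Dict Char Int)
  (s.toList.foldl solAStep (d, PySem.Dict.empty, 0)).2.2

-- ===== PORT B =====
def solution_alt (s : String) : Int :=
  let pref := (s.toList.foldl
    (fun (st : PySem.Set Char × List Int) c =>
      let seen := PySem.Set.add st.1 c
      (seen, st.2 ++ [(seen.length : Int)]))
    ((PySem.Set.empty : PySem.Set Char), ([] : List Int))).2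
  let suff := ((s.toList.reverse.foldl
    (fun (st : PySem.Set Char × List Int) c =>
      (PySem.Set.add st.1 c, st.2 ++ [(st.1.length : Int)]))
    ((PySem.Set.empty : PySem.Set Char), ([] : List Int))).2).reverse
  ((pref.zip suff).countP (fun p => p.1 == p.2) : Int)

-- ===== PRECONDITION & SPEC =====
def Spec_solution (s : String) (out : Int) : Prop := out = solution_alt s
instance (s : String) (out : Int) : Decidable (Spec_solution s out) := by unfold Spec_solution; infer_instance

-- ===== CLAIM (what is proved, stated in full; the proofs are below) =====
def Claim_equal_solution : Prop := ∀ (s : String), Dom_solution s → Spec_solution s (solution s)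

-- ===== LEMMAS AND PROOFS =====

-- number of distinct chars of a list (order-insensitive canonical form)
def dcount (xs : List Char) : Nat := xs.toFinset.card

-- the common mathematical value of both programs
def splitCount (l : List Char) : Int :=
  ((List.range l.length).countP
    (fun i => decide (dcount (l.take (i+1)) = dcount (l.drop (i+1)))) : Nat)

lemma ofList_length (xs : List Char) : (PySem.Set.ofList xs).length = dcount xs := by
  have h1 : (PySem.Set.ofList xs).toFinset = xs.toFinset := by
    ext c; simp [PySem.Set.mem_ofList]
  have h2 := List.toFinset_card_of_nodup (PySem.Set.nodup_ofList (xs := xs))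
  rw [dcount, ← h1, h2]

lemma nodup_length_eq_dcount (ks : List Char) (xs : List Char) (hnd : ks.Nodup)
    (hm : ∀ c, c ∈ ks ↔ c ∈ xs) : ks.length = dcount xs := by
  have h1 : ks.toFinset = xs.toFinset := by ext c; simp [hm c]
  rw [← List.toFinset_card_of_nodup hnd, h1, dcount]

lemma size_eq_keys_length (d : PySem.Dict Char Int) : d.size = d.keys.length := by
  simp [PySem.Dict.size, PySem.Dict.keys]

lemma get?_erase (d : PySem.Dict Char Int) (k c : Char) :
    (d.erase k).get? c = if c = k then none else d.get? c := by
  obtain ⟨items⟩ := d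
  induction items with
  | nil => simp [PySem.Dict.erase, PySem.Dict.get?]
  | cons p rest ih =>
    simp only [PySem.Dict.erase, PySem.Dict.get?, List.filter_cons] at *
    by_cases hpk : p.1 = k <;> by_cases hck : c = k <;>
      by_cases hpc : p.1 = c <;>
      simp_all [beq_iff_eq]

lemma keys_erase (d : PySem.Dict Char Int) (k : Char) :
    (d.erase k).keys = d.keys.filter (fun c => !(c == k)) := by
  obtain ⟨items⟩ := d
  induction items with
  | nil => simp [PySem.Dict.erase, PySem.Dict.keys]
  | cons p rest ih =>
    simp only [PySem.Dict.erase, PySem.Dict.keys, List.filter_cons] at *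
    by_cases hpk : p.1 = k <;> simp_all

lemma counter_branch (t : PySem.Dict Char Int) (c : Char) :
    (if t.contains c then t.modify c 0 (· + 1) else t.insert c 1) = t.modify c 0 (· + 1) := by
  by_cases h : t.contains c = true
  · simp [h]
  · have h0 : t.getD c 0 = 0 :=
      PySem.Dict.getD_of_not_contains t 0 (by simpa using h)
    simp [h, PySem.Dict.modify, h0]

lemma first_loop_eq_counter (l : List Char) :
    l.foldl (fun d c => if d.contains c then d.modify c 0 (· + 1) else d.insert c 1)
      (PySem.Dict.empty : PySem.Dict Char Int) = PySem.Dict.counter l := by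
  rw [PySem.Dict.counter_eq_foldl]
  congr 1
  funext d c
  exact counter_branch d c

lemma loopA (suf : List Char) : ∀ (d : PySem.Dict Char Int) (p : List Char) (count : Int),
    d.keys.Nodup →
    (∀ c, c ∈ d.keys ↔ c ∈ suf) →
    (∀ c, d.getD c 0 = (suf.count c : Int)) →
    (suf.foldl solAStep (d, PySem.Dict.counter p, count)).2.2
      = count + ((List.range suf.length).countP
          (fun i => decide (dcount (p ++ suf.take (i+1)) = dcount (suf.drop (i+1)))) : Nat) := by
  induction suf with
  | nil => intro d p count _ _ _; simp
  | cons c suf ih =>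
    intro d p count hnd hmem hcnt
    have hcmemd : c ∈ d.keys := (hmem c).2 (List.mem_cons_self)
    have hcont : d.contains c = true := (PySem.Dict.contains_iff_mem_keys d c).2 hcmemd
    have hd1get : ∀ c', (d.modify c 0 (· - 1)).getD c' 0
        = if c' = c then (suf.count c : Int) else ((c :: suf).count c' : Int) := by
      intro c'
      rw [PySem.Dict.getD_modify]
      split_ifs with h
      · rw [hcnt c, List.count_cons_self]; push_cast; ring
      · exact hcnt c'
    have hd1keys : (d.modify c 0 (· - 1)).keys = d.keys := by
      rw [PySem.Dict.keys_modify, PySem.Dict.keys_insert_of_contains _ _ hcont]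
    set d1 := d.modify c 0 (· - 1) with hd1
    set d2 := if d1.getD c 0 == 0 then d1.erase c else d1 with hd2
    have hinv : d2.keys.Nodup ∧ (∀ c', c' ∈ d2.keys ↔ c' ∈ suf) ∧
        (∀ c', d2.getD c' 0 = (suf.count c' : Int)) := by
      by_cases hc : c ∈ suf
      · have hcnt0 : suf.count c ≠ 0 := by
          simpa [List.count_eq_zero] using hc
        have hcond : (d1.getD c 0 == 0) = false := by
          rw [hd1get c]; simp [hcnt0]
        have hd2e : d2 = d1 := by rw [hd2, hcond]; simp
        rw [hd2e]
        refine ⟨hd1keys ▸ hnd, ?_, ?_⟩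
        · intro c'
          rw [hd1keys, hmem c']
          constructor
          · intro h'
            rcases List.mem_cons.1 h' with rfl | h''
            exacts [hc, h'']
          · intro h; exact List.mem_cons_of_mem _ h
        · intro c'
          rw [hd1get c']
          split_ifs with h
          · subst h; rfl
          · have hcc : c ≠ c' := fun hx => h hx.symm
            simp [hcc]
      · have hcnt0 : suf.count c = 0 := by
          simpa [List.count_eq_zero] using hc
        have hcond : (d1.getD c 0 == 0) = true := by
          rw [hd1get c]; simp [hcnt0]
        have hd2e : d2 = d1.erase c := by rw [hd2, hcond]; simp
        rw [hd2e]
        refine ⟨?_, ?_, ?_⟩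
        · rw [keys_erase, hd1keys]; exact hnd.filter _
        · intro c'
          rw [keys_erase, List.mem_filter, hd1keys]
          simp only [Bool.not_eq_eq_eq_not, Bool.not_true, beq_eq_false_iff_ne, ne_eq]
          constructor
          · rintro ⟨hm, hne⟩
            rcases List.mem_cons.1 ((hmem c').1 hm) with rfl | h
            · exact absurd rfl hne
            · exact h
          · intro h
            refine ⟨(hmem c').2 (List.mem_cons_of_mem _ h), ?_⟩
            rintro rfl; exact hc h
        · intro c'
          by_cases h : c' = c
          · subst h
            simp [PySem.Dict.getD, get?_erase, hcnt0]
          · have : (d1.erase c).getD c' 0 = d1.getD c' 0 := by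
              simp [PySem.Dict.getD, get?_erase, h]
            rw [this, hd1get c', if_neg h]
            have hcc : c ≠ c' := fun hx => h hx.symm
            simp [hcc]
    obtain ⟨hnd2, hmem2, hcnt2⟩ := hinv
    have hd2size : d2.size = dcount suf := by
      rw [size_eq_keys_length]
      exact nodup_length_eq_dcount _ _ hnd2 hmem2
    have ht1 : (if (PySem.Dict.counter p).contains c
          then (PySem.Dict.counter p).modify c 0 (· + 1)
          else (PySem.Dict.counter p).insert c 1) = PySem.Dict.counter (p ++ [c]) := by
      rw [counter_branch, PySem.Dict.counter_append_singleton]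
    have ht1size : (PySem.Dict.counter (p ++ [c])).size = dcount (p ++ [c]) := by
      rw [size_eq_keys_length, PySem.Dict.keys_counter, ofList_length]
    have hstep : solAStep (d, PySem.Dict.counter p, count) c
        = (d2, PySem.Dict.counter (p ++ [c]),
            if dcount (p ++ [c]) = dcount suf then count + 1 else count) := by
      show (_, _, _) = _
      rw [ht1]
      refine congrArg (fun z => (d2, PySem.Dict.counter (p ++ [c]), z)) ?_
      rw [ht1size, hd2size]
      by_cases h : dcount (p ++ [c]) = dcount suf <;> simp [h]
    rw [List.foldl_cons, hstep, ih d2 (p ++ [c]) _ hnd2 hmem2 hcnt2]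
    have hpred : ∀ i, (decide (dcount ((p ++ [c]) ++ suf.take (i+1)) = dcount (suf.drop (i+1))))
        = (decide (dcount (p ++ (c :: suf).take (i+1+1)) = dcount ((c :: suf).drop (i+1+1)))) := by
      intro i
      simp [List.append_assoc]
    simp only [List.length_cons, List.range_succ_eq_map, List.countP_cons, List.countP_map]
    rw [List.countP_congr (fun i _ => by rw [hpred i])]
    simp only [List.take_succ_cons, List.take_zero, List.drop_succ_cons, List.drop_zero,
      Function.comp_def]
    by_cases h0 : dcount (p ++ [c]) = dcount suf <;> simp [h0] <;> ring

lemma solution_eq_splitCount (s : String) : solution s = splitCount s.toList := by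
  have h := loopA s.toList (PySem.Dict.counter s.toList) [] 0
    (PySem.Dict.nodup_keys_counter _)
    (by intro c; rw [PySem.Dict.keys_counter]; simp [PySem.Set.mem_ofList])
    (by intro c; rw [PySem.Dict.getD_counter])
  have hce : PySem.Dict.counter ([] : List Char) = (PySem.Dict.empty : PySem.Dict Char Int) := rfl
  rw [hce] at h
  simp only [solution, first_loop_eq_counter]
  rw [h]
  unfold splitCount
  simp only [List.nil_append, zero_add]
  rfl

lemma pref_fold (l : List Char) : ∀ (seen : PySem.Set Char) (acc : List Int),
    (l.foldl (fun (st : PySem.Set Char × List Int) c =>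
        let sn := PySem.Set.add st.1 c
        (sn, st.2 ++ [(sn.length : Int)])) (seen, acc)).2
    = acc ++ (List.range l.length).map
        (fun i => ((PySem.Set.update seen (l.take (i+1))).length : Int)) := by
  induction l with
  | nil => intro seen acc; simp
  | cons c l ih =>
    intro seen acc
    simp only [List.foldl_cons]
    rw [ih]
    simp only [List.length_cons, List.range_succ_eq_map]
    simp [List.map_map, Function.comp_def, PySem.Set.update,
      List.append_assoc]

lemma suff_fold (m : List Char) : ∀ (seen : PySem.Set Char) (acc : List Int),
    (m.foldl (fun (st : PySem.Set Char × List Int) c =>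
        (PySem.Set.add st.1 c, st.2 ++ [(st.1.length : Int)])) (seen, acc)).2
    = acc ++ (List.range m.length).map
        (fun j => ((PySem.Set.update seen (m.take j)).length : Int)) := by
  induction m with
  | nil => intro seen acc; simp
  | cons c m ih =>
    intro seen acc
    simp only [List.foldl_cons]
    rw [ih]
    simp only [List.length_cons, List.range_succ_eq_map]
    simp [List.map_map, Function.comp_def, PySem.Set.update,
      List.append_assoc]

lemma alt_eq_splitCount (s : String) : solution_alt s = splitCount s.toList := by
  simp only [solution_alt]
  rw [pref_fold, suff_fold]
  have hpref : ∀ i, ((PySem.Set.update PySem.Set.empty (s.toList.take (i+1))).length : Int)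
      = (dcount (s.toList.take (i+1)) : Int) := by
    intro i
    rw [PySem.Set.update_empty, ofList_length]
  have hsuff : (((List.range s.toList.reverse.length).map
        (fun j => ((PySem.Set.update PySem.Set.empty (s.toList.reverse.take j)).length : Int))).reverse)
      = (List.range s.toList.length).map (fun i => (dcount (s.toList.drop (i+1)) : Int)) := by
    apply List.ext_getElem
    · simp
    · intro i h1 h2
      simp only [List.length_reverse, List.length_map, List.length_range] at h1 h2
      simp only [List.getElem_reverse, List.getElem_map, List.getElem_range,
        List.length_map, List.length_range, List.length_reverse]
      rw [PySem.Set.update_empty, ofList_length]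
      congr 1
      rw [List.take_reverse]
      have harg : s.toList.length - (s.toList.length - 1 - i) = i + 1 := by omega
      rw [harg]
      simp [dcount]
  rw [List.nil_append, List.nil_append, hsuff]
  have hp : (List.range s.toList.length).map
      (fun i => ((PySem.Set.update PySem.Set.empty (s.toList.take (i+1))).length : Int))
      = (List.range s.toList.length).map (fun i => (dcount (s.toList.take (i+1)) : Int)) :=
    List.map_congr_left (fun i _ => hpref i)
  rw [hp, List.zip_map', List.countP_map]
  unfold splitCount
  congr 1
  apply List.countP_congr
  intro i _
  simp

-- ===== VERDICT (by name: the statement is the Claim_ definition above) =====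
theorem solution_spec : Claim_equal_solution := by
  intro s _
  unfold Spec_solution
  rw [solution_eq_splitCount, alt_eq_splitCount]
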